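-- pv_equiv track=rewrite | github.com/OlgaAlekhina/algorithms | lagestInt.py | find_maxint
-- ===== SOURCE A (Python) =====
-- def find_maxint(nums) -> int:
--     nums.sort()
--     i = 0
--     j = len(nums) - 1
--     while nums[i] < 0 and nums[j] > 0:
--         if nums[i] + nums[j] == 0:
--             return nums[j]
--         if abs(nums[i]) < nums[j]:
--             j -= 1
--         else:
--             i += 1
--
--     return -1
-- ===== SOURCE B (Python) =====
-- def find_maxint(nums) -> int:
--     # Different algorithm: sort (kept for A's in-place mutation), then one
--     # pass with a set lookup for the negated partner, tracking the best.
--     nums.sort()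
--     present = set(nums)
--     best = -1
--     for x in nums:
--         if x > 0 and -x in present and best < x:
--             best = x
--     return best
-- ===== Notes on version B (the rewrite author's own statement) =====
-- stated objective: alternative
-- what changed: Replaces A's converging two-pointer scan over the sorted list with a single pass that keeps a running maximum and tests for the negated partner via a hash set.
-- outside the precondition, e.g. on find_maxint([]): A raises IndexError, B returns -1
-- crash fix: On the empty list A raises IndexError (nums[0]); B returns -1. — e.g. on find_maxint([]): A raises IndexError, B returns -1
import Mathlib
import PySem

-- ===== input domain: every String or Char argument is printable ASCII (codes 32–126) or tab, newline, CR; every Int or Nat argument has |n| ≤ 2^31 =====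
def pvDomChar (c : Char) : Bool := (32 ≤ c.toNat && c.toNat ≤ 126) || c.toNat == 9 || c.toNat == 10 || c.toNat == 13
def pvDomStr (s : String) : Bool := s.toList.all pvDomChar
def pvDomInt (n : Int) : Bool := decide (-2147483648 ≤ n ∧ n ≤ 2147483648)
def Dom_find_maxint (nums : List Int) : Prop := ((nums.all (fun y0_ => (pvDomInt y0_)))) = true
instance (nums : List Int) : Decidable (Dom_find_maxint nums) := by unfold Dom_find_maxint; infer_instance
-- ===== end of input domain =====

-- B replaces A's converging two-pointer scan by a single pass with a set lookup; both
-- sort nums in place (the equivalence proved is about the return value; B performs the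
-- same mutation).

-- ===== PORT A =====
-- A's while loop: the two indices converge, so fuel = length bounds the iteration
-- count; the fuel is never exhausted on admitted inputs.
def pvLoopA (xs : List Int) : Nat → Nat → Nat → Int
  | 0, _, _ => -1
  | Nat.succ fuel, i, j =>
    if xs.getD i 0 < 0 ∧ 0 < xs.getD j 0 then
      if xs.getD i 0 + xs.getD j 0 = 0 then xs.getD j 0
      else if (if xs.getD i 0 < 0 then -(xs.getD i 0) else xs.getD i 0) < xs.getD j 0 then
        pvLoopA xs fuel i (j - 1)
      else pvLoopA xs fuel (i + 1) j
    else -1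

def find_maxint (nums : List Int) : Int :=
  let xs := PySem.List.sorted nums (fun x => x) false
  pvLoopA xs xs.length 0 (xs.length - 1)

-- ===== PORT B =====
def find_maxint_alt (nums : List Int) : Int :=
  let xs := PySem.List.sorted nums (fun x => x) false
  let present := PySem.Set.ofList xs
  xs.foldl (fun best x =>
    if 0 < x ∧ PySem.Set.contains present (-x) = true ∧ best < x then x else best) (-1)

-- ===== PRECONDITION & SPEC =====
-- Pre_ excludes only the empty list, on which A raises IndexError.
def Pre_find_maxint (nums : List Int) : Prop := nums ≠ []
instance (nums : List Int) : Decidable (Pre_find_maxint nums) := by unfold Pre_find_maxint; infer_instance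
def pvWitness_find_maxint : List Int := [3, -3, 2]

-- On the empty list A raises IndexError (nums[0]); B returns -1.
def Raises_find_maxint (nums : List Int) : Prop := nums = []
instance (nums : List Int) : Decidable (Raises_find_maxint nums) := by unfold Raises_find_maxint; infer_instance
def pvRaiseWitness_find_maxint : List Int := []
def pvRaiseWitnessOut_find_maxint : Int := -1

def Spec_find_maxint (nums : List Int) (out : Int) : Prop := out = find_maxint_alt nums
instance (nums : List Int) (out : Int) : Decidable (Spec_find_maxint nums out) := by unfold Spec_find_maxint; infer_instance

-- ===== CLAIM (what is proved, stated in full; the proofs are below) =====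
def Claim_equal_find_maxint : Prop := ∀ (nums : List Int), Dom_find_maxint nums → Pre_find_maxint nums → Spec_find_maxint nums (find_maxint nums)
def Claim_raises_find_maxint : Prop := (∀ (nums : List Int), Dom_find_maxint nums → Raises_find_maxint nums → ¬ Pre_find_maxint nums) ∧ (Dom_find_maxint (pvRaiseWitness_find_maxint) ∧ Raises_find_maxint (pvRaiseWitness_find_maxint) ∧ find_maxint_alt (pvRaiseWitness_find_maxint) = pvRaiseWitnessOut_find_maxint)

-- ===== LEMMAS AND PROOFS =====

-- the candidate predicate: positive with its negation present
def pvCond (xs : List Int) (x : Int) : Prop := 0 < x ∧ (-x) ∈ xs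

-- characterisation of the common result: -1 and no candidate, or the largest candidate
def pvChar (xs : List Int) (R : Int) : Prop :=
  (R = -1 ∧ ∀ x ∈ xs, ¬ pvCond xs x) ∨
  (R ∈ xs ∧ pvCond xs R ∧ ∀ x ∈ xs, pvCond xs x → x ≤ R)

lemma pvChar_unique (xs : List Int) (R S : Int) (hR : pvChar xs R) (hS : pvChar xs S) : R = S := by
  rcases hR with ⟨hR1, hR2⟩ | ⟨hRm, hRc, hRmax⟩ <;>
    rcases hS with ⟨hS1, hS2⟩ | ⟨hSm, hSc, hSmax⟩
  · omega
  · exact absurd hSc (hR2 _ hSm)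
  · exact absurd hRc (hS2 _ hRm)
  · exact le_antisymm (hSmax _ hRm hRc) (hRmax _ hSm hSc)

lemma pv_contains_iff (xs : List Int) (y : Int) :
    PySem.Set.contains (PySem.Set.ofList xs) y = true ↔ y ∈ xs := by
  simp

lemma pv_getD_mem (xs : List Int) {m : Nat} (hm : m < xs.length) : xs.getD m 0 ∈ xs := by
  rw [List.getD_eq_getElem xs 0 hm]
  exact List.getElem_mem hm

lemma pv_mem_getD (xs : List Int) {x : Int} (hx : x ∈ xs) :
    ∃ m, m < xs.length ∧ xs.getD m 0 = x := by
  obtain ⟨m, hm, h⟩ := List.mem_iff_getElem.mp hx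
  exact ⟨m, hm, by rw [List.getD_eq_getElem xs 0 hm, h]⟩

lemma pv_sorted_mono (xs : List Int) (hs : xs.Pairwise (· ≤ ·))
    {m n : Nat} (hm : m < xs.length) (hn : n < xs.length) (h : m ≤ n) :
    xs.getD m 0 ≤ xs.getD n 0 := by
  rw [List.getD_eq_getElem xs 0 hm, List.getD_eq_getElem xs 0 hn]
  rcases Nat.lt_or_ge m n with h' | h'
  · exact (List.pairwise_iff_getElem.mp hs) m n hm hn h'
  · have : m = n := Nat.le_antisymm h h'
    subst this
    exact le_refl _

lemma pv_fold_spec (xs : List Int) : ∀ (l : List Int) (b : Int),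
    let F := l.foldl (fun best x =>
      if 0 < x ∧ PySem.Set.contains (PySem.Set.ofList xs) (-x) = true ∧ best < x then x else best) b
    b ≤ F ∧ (∀ x ∈ l, pvCond xs x → x ≤ F) ∧ (F = b ∨ (F ∈ l ∧ pvCond xs F)) := by
  intro l
  induction l with
  | nil => intro b; exact ⟨le_refl _, by simp, Or.inl rfl⟩
  | cons x t ih =>
    intro b
    simp only [List.foldl_cons]
    by_cases hx : 0 < x ∧ PySem.Set.contains (PySem.Set.ofList xs) (-x) = true ∧ b < x
    · rw [if_pos hx]
      obtain ⟨h1, h2, h3⟩ := ih x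
      refine ⟨le_of_lt (lt_of_lt_of_le hx.2.2 h1), ?_, ?_⟩
      · intro y hy hcy
        rcases List.mem_cons.mp hy with rfl | hy'
        · exact h1
        · exact h2 y hy' hcy
      · rcases h3 with h | ⟨hm, hc⟩
        · refine Or.inr ⟨?_, ?_⟩
          · rw [h]; exact List.mem_cons_self ..
          · rw [h]; exact ⟨hx.1, (pv_contains_iff xs (-x)).mp hx.2.1⟩
        · exact Or.inr ⟨List.mem_cons_of_mem _ hm, hc⟩
    · rw [if_neg hx]
      obtain ⟨h1, h2, h3⟩ := ih b
      refine ⟨h1, ?_, ?_⟩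
      · intro y hy hcy
        rcases List.mem_cons.mp hy with rfl | hy'
        · by_contra hlt
          exact hx ⟨hcy.1, (pv_contains_iff xs (-y)).mpr hcy.2, by omega⟩
        · exact h2 y hy' hcy
      · rcases h3 with h | ⟨hm, hc⟩
        · exact Or.inl h
        · exact Or.inr ⟨List.mem_cons_of_mem _ hm, hc⟩

lemma pv_loop_char (xs : List Int) (hs : xs.Pairwise (· ≤ ·)) :
    ∀ (fuel i j : Nat), i ≤ j → j < xs.length → j - i < fuel →
      (∀ k, k < i → -(xs.getD k 0) ∉ xs) →
      (∀ k, j < k → k < xs.length → -(xs.getD k 0) ∉ xs) →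
      pvChar xs (pvLoopA xs fuel i j) := by
  intro fuel
  induction fuel with
  | zero => intro i j _ _ hf _ _; exact absurd hf (by omega)
  | succ fuel ih =>
    intro i j hij hj hf inv1 inv2
    have hi : i < xs.length := lt_of_le_of_lt hij hj
    simp only [pvLoopA]
    by_cases hcnd : xs.getD i 0 < 0 ∧ 0 < xs.getD j 0
    · rw [if_pos hcnd]
      have hij' : i < j := by
        rcases Nat.lt_or_ge i j with h | h
        · exact h
        · exfalso
          have e : i = j := Nat.le_antisymm hij h
          rw [e] at hcnd
          omega
      by_cases hsum : xs.getD i 0 + xs.getD j 0 = 0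
      · rw [if_pos hsum]
        refine Or.inr ⟨pv_getD_mem xs hj, ⟨hcnd.2, ?_⟩, ?_⟩
        · have e : -(xs.getD j 0) = xs.getD i 0 := by omega
          rw [e]
          exact pv_getD_mem xs hi
        · intro x hx hcx
          by_contra hgt
          obtain ⟨m, hm, hxm⟩ := pv_mem_getD xs hx
          have hmj : j < m := by
            by_contra hle
            have := pv_sorted_mono xs hs hm hj (by omega)
            omega
          exact inv2 m hmj hm (by rw [hxm]; exact hcx.2)
      · rw [if_neg hsum, if_pos hcnd.1]
        by_cases hlt : -(xs.getD i 0) < xs.getD j 0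
        · rw [if_pos hlt]
          refine ih i (j - 1) (by omega) (by omega) (by omega) inv1 ?_
          intro k hk hkl
          rcases Nat.lt_or_ge j k with h | h
          · exact inv2 k h hkl
          · have e : k = j := by omega
            subst e
            intro hmem
            obtain ⟨m, hm, hxm⟩ := pv_mem_getD xs hmem
            have hmi : m < i := by
              by_contra hle
              have := pv_sorted_mono xs hs hi hm (by omega)
              omega
            exact inv1 m hmi (by rw [hxm, neg_neg]; exact pv_getD_mem xs hkl)
        · rw [if_neg hlt]
          refine ih (i + 1) j (by omega) hj (by omega) ?_ inv2
          intro k hk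
          rcases Nat.lt_or_ge k i with h | h
          · exact inv1 k h
          · have e : k = i := by omega
            subst e
            intro hmem
            obtain ⟨m, hm, hxm⟩ := pv_mem_getD xs hmem
            have hmj : j < m := by
              by_contra hle
              have := pv_sorted_mono xs hs hm hj (by omega)
              omega
            exact inv2 m hmj hm (by rw [hxm, neg_neg]; exact pv_getD_mem xs hi)
    · rw [if_neg hcnd]
      refine Or.inl ⟨rfl, ?_⟩
      rintro x hx ⟨hxpos, hxneg⟩
      obtain ⟨m, hm, hxm⟩ := pv_mem_getD xs hx
      obtain ⟨m', hm', hxm'⟩ := pv_mem_getD xs hxneg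
      rcases not_and_or.mp hcnd with h | h
      ·
        have hmi : m' < i := by
          by_contra hle
          have := pv_sorted_mono xs hs hi hm' (by omega)
          omega
        exact inv1 m' hmi (by rw [hxm', neg_neg]; exact hx)
      · have hmj : j < m := by
          by_contra hle
          have := pv_sorted_mono xs hs hm hj (by omega)
          omega
        exact inv2 m hmj hm (by rw [hxm]; exact hxneg)

-- ===== VERDICT (by name: the statement is the Claim_ definition above) =====
theorem find_maxint_spec : Claim_equal_find_maxint := by
  intro nums _ hpre
  unfold Spec_find_maxint find_maxint find_maxint_alt
  have hs : (PySem.List.sorted nums (fun x => x) false).Pairwise (· ≤ ·) := by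
    simpa using PySem.List.sorted_pairwise (xs := nums) (key := fun x => x)
  set xs := PySem.List.sorted nums (fun x => x) false with hxs
  have hne : xs ≠ [] := by
    rw [hxs, Ne, PySem.List.sorted_eq_nil_iff]
    exact hpre
  have hlen : 0 < xs.length := List.length_pos_iff.mpr hne
  have hA : pvChar xs (pvLoopA xs xs.length 0 (xs.length - 1)) := by
    refine pv_loop_char xs hs xs.length 0 (xs.length - 1) (by omega) (by omega) (by omega) ?_ ?_
    · intro k hk
      exact absurd hk (by omega)
    · intro k hk hkl
      exact absurd hkl (by omega)
  obtain ⟨h1, h2, h3⟩ := pv_fold_spec xs xs (-1)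
  have hBchar : pvChar xs (xs.foldl (fun best x =>
      if 0 < x ∧ PySem.Set.contains (PySem.Set.ofList xs) (-x) = true ∧ best < x then x else best) (-1)) := by
    rcases h3 with h | ⟨hm, hc⟩
    · refine Or.inl ⟨h, ?_⟩
      intro x hx hcx
      have h4 := h2 x hx hcx
      have h5 := hcx.1
      rw [h] at h4
      omega
    · exact Or.inr ⟨hm, hc, h2⟩
  exact pvChar_unique xs _ _ hA hBchar

@[simp] theorem find_maxint_raises : Claim_raises_find_maxint := by
  unfold Claim_raises_find_maxint
  refine ⟨fun nums _ hr => ?_, by decide⟩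
  simp only [Raises_find_maxint] at hr
  simp [Pre_find_maxint, hr]
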